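-- pv_equiv track=rewrite | github.com/pengisblue/AlgorithmStudy | 02_List_2/bavo/2343_guitar.py | make_blueray
-- ===== SOURCE A (Python) =====
-- def make_blueray(total, size, arr):
--
--     blueray_count = 0
--     temp_index = len(arr) - 1
--     while blueray_count < total:
--         temp_sum = 0
--         while temp_index >= 0 and temp_sum + arr[temp_index] <= size:
--             temp_sum += arr[temp_index]
--             temp_index -= 1
--         if temp_index < 0:
--             return True
--         else:
--             blueray_count += 1
--     return False
-- ===== SOURCE B (Python) =====
-- def make_blueray(total, size, arr):
--     # Prefix sums of the consumption order plus binary-search jumps: each group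
--     # boundary is found by bisecting the monotone prefix-sum array (tracks are
--     # nonnegative) instead of accumulating element by element as A does.
--     if total <= 0:
--         return False
--     if any(x > size for x in arr):
--         return False
--     pre = [0]
--     s = 0
--     for x in reversed(arr):
--         s += x
--         pre.append(s)
--     n = len(arr)
--     i = 0
--     g = 0
--     while i < n:
--         pi = pre[i]
--         lo, hi = i + 1, n
--         while lo < hi:
--             mid = (lo + hi + 1) // 2
--             if pre[mid] - pi <= size:
--                 lo = mid
--             else:
--                 hi = mid - 1
--         i = lo
--         g += 1
--     return g <= total
-- ===== Notes on version B (the rewrite author's own statement) =====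
-- stated objective: alternative
-- what changed: Replaced A's nested while-loops that accumulate elements one by one into up to `total` groups with a prefix-sum array over the consumption order plus hand-rolled binary-search jumps that locate each group boundary by bisection (valid because prefix sums are monotone on nonnegative lengths), then compare the group count with total.
-- outside the precondition, e.g. on make_blueray(1, 3, [1, -2, 1, 3]): A returns False, B returns True
import Mathlib
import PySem

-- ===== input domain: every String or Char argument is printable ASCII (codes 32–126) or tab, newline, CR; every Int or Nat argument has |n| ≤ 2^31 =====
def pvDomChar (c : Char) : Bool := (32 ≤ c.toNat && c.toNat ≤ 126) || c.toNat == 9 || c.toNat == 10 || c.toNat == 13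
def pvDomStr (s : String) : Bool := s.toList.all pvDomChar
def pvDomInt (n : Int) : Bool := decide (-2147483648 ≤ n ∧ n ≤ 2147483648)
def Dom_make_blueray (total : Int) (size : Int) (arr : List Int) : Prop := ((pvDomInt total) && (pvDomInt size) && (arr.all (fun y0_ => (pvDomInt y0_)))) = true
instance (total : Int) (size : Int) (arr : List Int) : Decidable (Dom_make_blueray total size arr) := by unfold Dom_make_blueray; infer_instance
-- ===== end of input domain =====

-- B replaces A's nested element-by-element while-loops with a prefix-sum array over the
-- consumption order and binary-search jumps to each group boundary (objective: alternative);
-- equality of return values is proved for nonnegative track lengths (Pre_).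

-- ===== PORT A =====
-- inner while loop of A: consume elements arr[i], arr[i-1], … while they fit; returns the
-- final temp_index.  arr[temp_index] is read via pyGet?; `.getD 0` is never taken with i out
-- of range because the loop guard requires 0 ≤ i and i only decreases from len-1 (exact).
def pvInnerA (size : Int) (arr : List Int) (i : Int) (s : Int) : Int :=
  if h : 0 ≤ i ∧ s + (PySem.List.pyGet? arr i).getD 0 ≤ size then
    pvInnerA size arr (i - 1) (s + (PySem.List.pyGet? arr i).getD 0)
  else i
termination_by (i + 1).toNat
decreasing_by omega

-- outer while loop of A
def pvOuterA (total size : Int) (arr : List Int) (count i : Int) : Bool :=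
  if h : count < total then
    let i' := pvInnerA size arr i 0
    if i' < 0 then true
    else pvOuterA total size arr (count + 1) i'
  else false
termination_by (total - count).toNat
decreasing_by omega

def make_blueray (total : Int) (size : Int) (arr : List Int) : Bool :=
  pvOuterA total size arr 0 (arr.length - 1)

-- ===== PORT B =====
-- `for x in reversed(arr): s += x; pre.append(s)` building the prefix-sum list
def pvPreLoop (acc : List Int) : List Int → Int → List Int
  | [], _ => acc
  | x :: r, s => pvPreLoop (acc ++ [s + x]) r (s + x)

-- inner `while lo < hi` binary search of Source B; pre[mid] read via pyGet? (always in range);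
-- the fuel argument only makes the loop total (hi - lo shrinks each step; callers pass hi - lo)
def pvBS (pre : List Int) (pi_ size : Int) : Nat → Nat → Nat → Nat
  | 0, lo, _ => lo
  | fuel + 1, lo, hi =>
    if lo < hi then
      let mid := (lo + hi + 1) / 2
      if (PySem.List.pyGet? pre (mid : Int)).getD 0 - pi_ ≤ size then pvBS pre pi_ size fuel mid hi
      else pvBS pre pi_ size fuel lo (mid - 1)
    else lo

-- outer `while i < n` loop of Source B (fuel n + 1 suffices: i advances by at least 1 each turn)
def pvOuterB (pre : List Int) (size : Int) (n : Nat) : Nat → Nat → Nat → Nat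
  | 0, _, g => g
  | fuel + 1, i, g =>
    if i < n then
      pvOuterB pre size n fuel
        (pvBS pre ((PySem.List.pyGet? pre (i : Int)).getD 0) size (n - (i + 1)) (i + 1) n) (g + 1)
    else g

def make_blueray_alt (total : Int) (size : Int) (arr : List Int) : Bool :=
  if total ≤ 0 then false
  else if arr.any (fun x => size < x) then false
  else
    let pre := pvPreLoop [0] arr.reverse 0
    let n := arr.length
    decide ((pvOuterB pre size n (n + 1) 0 0 : Int) ≤ total)

-- ===== PRECONDITION & SPEC =====
-- Pre_ restricts to nonnegative track lengths — the problem's natural domain (durations);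
-- on negative lengths the prefix sums are not monotone and B's binary-search jumps can
-- disagree with A's greedy scan, so those inputs (on which A still returns) are excluded.
def Pre_make_blueray (total : Int) (size : Int) (arr : List Int) : Prop := ∀ x ∈ arr, 0 ≤ x
instance (total : Int) (size : Int) (arr : List Int) : Decidable (Pre_make_blueray total size arr) := by unfold Pre_make_blueray; infer_instance

def pvWitness_make_blueray : Int × Int × List Int := (2, 3, [1, 2, 3])

def Spec_make_blueray (total : Int) (size : Int) (arr : List Int) (out : Bool) : Prop := out = make_blueray_alt total size arr
instance (total : Int) (size : Int) (arr : List Int) (out : Bool) : Decidable (Spec_make_blueray total size arr out) := by unfold Spec_make_blueray; infer_instance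

-- ===== CLAIM (what is proved, stated in full; the proofs are below) =====
def Claim_equal_make_blueray : Prop := ∀ (total : Int) (size : Int) (arr : List Int), Dom_make_blueray total size arr → Pre_make_blueray total size arr → Spec_make_blueray total size arr (make_blueray total size arr)

-- ===== LEMMAS AND PROOFS =====

-- reference program: A's computation over the list of still-unconsumed elements (in
-- consumption order) with the current inner sum s and outer count
def pvG (total size : Int) : List Int → Int → Int → Bool
  | [], _, _ => true
  | x :: r, s, count =>
    if s + x ≤ size then pvG total size r (s + x) count
    else if count + 1 < total then pvG total size (x :: r) 0 (count + 1)
    else false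
termination_by l s count => (l.length, (total - count).toNat)
decreasing_by
  · exact Prod.Lex.left _ _ (by simp)
  · exact Prod.Lex.right _ (by omega)

theorem take_succ_reverse (arr : List Int) (i : Int) (h0 : 0 ≤ i) (h1 : i < arr.length) :
    (arr.take (i + 1).toNat).reverse
      = (PySem.List.pyGet? arr i).getD 0 :: (arr.take i.toNat).reverse := by
  have hi : i.toNat < arr.length := by omega
  rw [PySem.List.pyGet?_eq_some_getElem arr h0 h1]
  rw [show (i + 1).toNat = i.toNat + 1 by omega, List.take_add_one]
  simp [hi]

-- bridge: A's state (index i, inner sum s, count) corresponds to pvG on the reversed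
-- prefix of length i+1
theorem pvMidA_eq_pvG (total size : Int) (arr : List Int) :
    ∀ (i s count : Int), -1 ≤ i → i < arr.length → count < total →
      (if pvInnerA size arr i s < 0 then true
       else pvOuterA total size arr (count + 1) (pvInnerA size arr i s))
      = pvG total size ((arr.take (i + 1).toNat).reverse) s count := by
  intro i s count hlo hhi hc
  by_cases hneg : i < 0
  · have hi : i = -1 := by omega
    subst hi
    rw [pvInnerA, dif_neg (by rintro ⟨h, -⟩; omega)]
    norm_num [pvG]
  · push_neg at hneg
    rw [take_succ_reverse arr i hneg hhi]
    set x := (PySem.List.pyGet? arr i).getD 0 with hx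
    by_cases hfit : s + x ≤ size
    · rw [pvInnerA, dif_pos ⟨hneg, hfit⟩]
      rw [pvG, if_pos hfit]
      have h := pvMidA_eq_pvG total size arr (i - 1) (s + x) count (by omega) (by omega) hc
      rw [show (i - 1 + 1).toNat = i.toNat by omega] at h
      exact h
    · rw [pvInnerA]
      rw [dif_neg (by exact fun h => hfit h.2)]
      rw [if_neg (by omega)]
      rw [pvG, if_neg hfit]
      rw [pvOuterA]
      by_cases h2 : count + 1 < total
      · rw [dif_pos h2, if_pos h2]
        have := pvMidA_eq_pvG total size arr i 0 (count + 1) (by omega) hhi h2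
        rw [take_succ_reverse arr i hneg hhi] at this
        exact this
      · rw [dif_neg h2, if_neg h2]
termination_by i s count => ((i + 1).toNat, (total - count).toNat)
decreasing_by
  all_goals first
    | exact Prod.Lex.left _ _ (by omega)
    | exact Prod.Lex.right _ (by omega)

theorem A_eq_pvG (total size : Int) (arr : List Int) (ht : 0 < total) :
    make_blueray total size arr = pvG total size arr.reverse 0 0 := by
  unfold make_blueray
  rw [pvOuterA, dif_pos (by omega)]
  have h := pvMidA_eq_pvG total size arr (arr.length - 1) 0 0 (by omega) (by omega) (by omega)
  have he : ((arr.length : Int) - 1 + 1).toNat = arr.length := by omega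
  rw [he, List.take_length] at h
  exact h

-- number of elements A's inner loop consumes from list t starting with inner sum s
def pvChopN (size : Int) : Int → List Int → Nat
  | _, [] => 0
  | s, x :: r => if s + x ≤ size then 1 + pvChopN size (s + x) r else 0

theorem pvChopN_le_length (size : Int) : ∀ (s : Int) (t : List Int), pvChopN size s t ≤ t.length := by
  intro s t
  induction t generalizing s with
  | nil => simp [pvChopN]
  | cons x r ih =>
    rw [pvChopN]
    split
    · have := ih (s + x)
      simp only [List.length_cons]
      omega
    · simp

-- greedy group count (each group consumes its first element unconditionally, then pvChopN)
def pvSeg (size : Int) : List Int → Nat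
  | [] => 0
  | x :: r => 1 + pvSeg size (r.drop (pvChopN size x r))
termination_by l => l.length
decreasing_by
  have := pvChopN_le_length size x r
  simp only [List.length_drop, List.length_cons]
  omega

theorem pvG_chop (total size : Int) : ∀ (l : List Int) (s count : Int),
    pvG total size l s count =
      if l.drop (pvChopN size s l) = [] then true
      else if count + 1 < total then pvG total size (l.drop (pvChopN size s l)) 0 (count + 1)
      else false := by
  intro l
  induction l with
  | nil => intro s count; rw [pvG]; simp [pvChopN]
  | cons x r ih =>
    intro s count
    rw [pvG, pvChopN]
    by_cases hfit : s + x ≤ size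
    · rw [if_pos hfit, if_pos hfit, ih (s + x) count]
      have hd : (x :: r).drop (1 + pvChopN size (s + x) r) = r.drop (pvChopN size (s + x) r) := by
        rw [Nat.add_comm]
        exact List.drop_succ_cons
      rw [hd]
    · rw [if_neg hfit, if_neg hfit]
      simp only [List.drop_zero]
      rw [if_neg (List.cons_ne_nil x r)]

theorem pvSeg_pos (size : Int) (l : List Int) (h : l ≠ []) : 1 ≤ pvSeg size l := by
  cases l with
  | nil => exact absurd rfl h
  | cons x r => rw [pvSeg]; omega

theorem pvG_eq_seg_aux (total size : Int) (n : Nat) : ∀ (l : List Int), l.length ≤ n →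
    (∀ x ∈ l, x ≤ size) → ∀ count : Int, count < total →
      pvG total size l 0 count = decide (count + (pvSeg size l : Int) ≤ total) := by
  induction n with
  | zero =>
    intro l hl hle count hc
    have hnil : l = [] := List.length_eq_zero_iff.mp (by omega)
    subst hnil
    rw [pvG, pvSeg]
    symm
    rw [decide_eq_true_iff]
    push_cast
    omega
  | succ n ih =>
    intro l hl hle count hc
    cases l with
    | nil =>
      rw [pvG, pvSeg]
      symm
      rw [decide_eq_true_iff]
      push_cast
      omega
    | cons x r =>
      have hx : (0 : Int) + x ≤ size := by have := hle x (by simp); omega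
      rw [pvG_chop total size (x :: r) 0 count]
      have hch : pvChopN size 0 (x :: r) = 1 + pvChopN size x r := by
        rw [pvChopN, if_pos hx, zero_add]
      have hdrop : (x :: r).drop (pvChopN size 0 (x :: r)) = r.drop (pvChopN size x r) := by
        rw [hch, Nat.add_comm]
        exact List.drop_succ_cons
      have hseg : pvSeg size (x :: r) = 1 + pvSeg size (r.drop (pvChopN size x r)) := by
        rw [pvSeg]
      rw [hdrop, hseg]
      by_cases hre : r.drop (pvChopN size x r) = []
      · rw [if_pos hre, hre, pvSeg]
        symm
        rw [decide_eq_true_iff]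
        push_cast
        omega
      · rw [if_neg hre]
        by_cases h2 : count + 1 < total
        · rw [if_pos h2]
          have hler : ∀ y ∈ r.drop (pvChopN size x r), y ≤ size :=
            fun y hy => hle y (List.mem_cons_of_mem x (List.mem_of_mem_drop hy))
          have hlen : (r.drop (pvChopN size x r)).length ≤ n := by
            have := List.length_drop (l := r) (i := pvChopN size x r)
            simp only [List.length_cons] at hl
            omega
          rw [ih (r.drop (pvChopN size x r)) hlen hler (count + 1) h2]
          congr 1
          push_cast
          ring
        · rw [if_neg h2]
          have h1 := pvSeg_pos size _ hre
          symm
          rw [decide_eq_false_iff_not]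
          push_cast
          omega

theorem pvG_eq_seg (total size : Int) (l : List Int) (hle : ∀ x ∈ l, x ≤ size)
    (count : Int) (hc : count < total) :
    pvG total size l 0 count = decide (count + (pvSeg size l : Int) ≤ total) :=
  pvG_eq_seg_aux total size l.length l le_rfl hle count hc

theorem pvG_stuck (total size : Int) (x : Int) (r : List Int) (hx : size < x) :
    ∀ count, pvG total size (x :: r) 0 count = false := by
  intro count
  by_cases h : count + 1 < total
  · rw [pvG, if_neg (show ¬ (0 + x ≤ size) by omega), if_pos h]
    exact pvG_stuck total size x r hx (count + 1)
  · rw [pvG, if_neg (show ¬ (0 + x ≤ size) by omega), if_neg h]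
termination_by count => (total - count).toNat
decreasing_by omega

theorem pvG_oversize (total size : Int) (l : List Int) (hnn0 : ∀ x ∈ l, 0 ≤ x)
    (hex0 : ∃ x ∈ l, size < x) (s count : Int) (hs : 0 ≤ s) :
    pvG total size l s count = false := by
  revert hnn0 hex0 hs
  induction l generalizing s count with
  | nil => intro _ hex _; simp at hex
  | cons x r ih =>
    intro hnn hex hs
    have hexr : x ≤ size → ∃ y ∈ r, size < y := by
      intro hxle
      rcases hex with ⟨y, hy, hys⟩
      rcases List.mem_cons.mp hy with h | h
      · exact absurd hys (by rw [h]; omega)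
      · exact ⟨y, h, hys⟩
    rw [pvG]
    by_cases hfit : s + x ≤ size
    · rw [if_pos hfit]
      have hxle : x ≤ size := le_trans (by omega) hfit
      exact ih (s + x) count (fun y hy => hnn y (List.mem_cons_of_mem x hy)) (hexr hxle)
        (by have := hnn x (by simp); omega)
    · rw [if_neg hfit]
      by_cases h2 : count + 1 < total
      · rw [if_pos h2]
        by_cases hxs : size < x
        · exact pvG_stuck total size x r hxs (count + 1)
        · push_neg at hxs
          rw [pvG, if_pos (by omega : (0 : Int) + x ≤ size)]
          exact ih (0 + x) (count + 1) (fun y hy => hnn y (List.mem_cons_of_mem x hy))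
            (hexr hxs) (by have := hnn x (by simp); omega)
      · rw [if_neg h2]

-- ----- B side -----

theorem pvPreLoop_eq : ∀ (r : List Int) (acc : List Int) (s : Int),
    pvPreLoop acc r s = acc ++ (List.range r.length).map (fun j => s + (r.take (j + 1)).sum) := by
  intro r
  induction r with
  | nil => intro acc s; simp [pvPreLoop]
  | cons x t ih =>
    intro acc s
    rw [pvPreLoop, ih]
    have hfun : ((fun j => s + ((x :: t).take (j + 1)).sum) ∘ Nat.succ)
        = fun j => (s + x) + (t.take (j + 1)).sum := by
      funext j
      simp only [Function.comp_apply, List.take_succ_cons, List.sum_cons]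
      ring
    rw [List.length_cons, List.range_succ_eq_map, List.map_cons, List.map_map, hfun]
    simp [List.append_assoc, List.take_succ_cons]

theorem pvPre_getP (l : List Int) (j : Nat) (hj : j ≤ l.length) :
    (PySem.List.pyGet? (pvPreLoop [0] l 0) (j : Int)).getD 0 = (l.take j).sum := by
  rw [pvPreLoop_eq l [0] 0, List.singleton_append]
  have hlen : ((0 : Int) :: (List.range l.length).map (fun j => 0 + (l.take (j + 1)).sum)).length
      = l.length + 1 := by simp
  rw [PySem.List.pyGet?_eq_some_getElem _ (by exact_mod_cast Nat.zero_le j)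
    (by rw [hlen]; exact_mod_cast Nat.lt_succ_of_le hj)]
  simp only [Option.getD_some, Int.toNat_natCast]
  cases j with
  | zero => simp
  | succ k =>
    have hk : k < l.length := by omega
    simp [hk]

theorem takeSum_mono (l : List Int) (hnn : ∀ x ∈ l, 0 ≤ x) :
    ∀ j k : Nat, j ≤ k → (l.take j).sum ≤ (l.take k).sum := by
  intro j k hjk
  have h1 : l.take k = l.take j ++ (l.drop j).take (k - j) := by
    rw [← List.take_add, Nat.add_sub_cancel' hjk]
  rw [h1, List.sum_append]
  have h2 : 0 ≤ ((l.drop j).take (k - j)).sum :=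
    List.sum_nonneg fun x hx => hnn x (List.mem_of_mem_drop (List.mem_of_mem_take hx))
  omega

theorem pvChopN_sum_le (size : Int) : ∀ (t : List Int) (s : Int), 0 < pvChopN size s t →
    s + (t.take (pvChopN size s t)).sum ≤ size := by
  intro t
  induction t with
  | nil => intro s h; simp [pvChopN] at h
  | cons x r ih =>
    intro s h
    rw [pvChopN] at h ⊢
    by_cases hfit : s + x ≤ size
    · rw [if_pos hfit] at h ⊢
      rw [Nat.add_comm, List.take_succ_cons, List.sum_cons]
      by_cases hk : 0 < pvChopN size (s + x) r
      · have := ih (s + x) hk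
        omega
      · have hk0 : pvChopN size (s + x) r = 0 := by omega
        rw [hk0]
        simp only [List.take_zero, List.sum_nil]
        omega
    · rw [if_neg hfit] at h
      omega

theorem pvChopN_stop (size : Int) : ∀ (t : List Int) (s : Int), pvChopN size s t < t.length →
    size < s + (t.take (pvChopN size s t + 1)).sum := by
  intro t
  induction t with
  | nil => intro s h; simp [pvChopN] at h
  | cons x r ih =>
    intro s h
    rw [pvChopN] at h ⊢
    by_cases hfit : s + x ≤ size
    · rw [if_pos hfit] at h ⊢
      have hlt : pvChopN size (s + x) r < r.length := by
        simp only [List.length_cons] at h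
        omega
      have := ih (s + x) hlt
      rw [show 1 + pvChopN size (s + x) r + 1 = pvChopN size (s + x) r + 1 + 1 by omega,
        List.take_succ_cons, List.sum_cons]
      omega
    · rw [if_neg hfit] at h ⊢
      simp only [List.take_succ_cons, List.take_zero, List.sum_cons, List.sum_nil]
      omega

theorem pvBS_exact (pre : List Int) (pi_ size : Int) :
    ∀ (fuel lo hi m : Nat), hi - lo ≤ fuel → lo ≤ m → m ≤ hi →
      (∀ j, lo ≤ j → j ≤ m → (PySem.List.pyGet? pre (j : Int)).getD 0 - pi_ ≤ size) →
      (∀ j, m < j → j ≤ hi → ¬ ((PySem.List.pyGet? pre (j : Int)).getD 0 - pi_ ≤ size)) →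
      pvBS pre pi_ size fuel lo hi = m := by
  intro fuel
  induction fuel with
  | zero =>
    intro lo hi m h0 h1 h2 _ _
    rw [pvBS]
    omega
  | succ f ih =>
    intro lo hi m h0 h1 h2 hfe hinf
    rw [pvBS]
    dsimp only
    by_cases hlh : lo < hi
    · rw [if_pos hlh]
      have hmid1 : lo + 1 ≤ (lo + hi + 1) / 2 := by omega
      have hmid2 : (lo + hi + 1) / 2 ≤ hi := by omega
      by_cases hfeas : (PySem.List.pyGet? pre (((lo + hi + 1) / 2 : Nat) : Int)).getD 0 - pi_ ≤ size
      · rw [if_pos hfeas]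
        have hmm : (lo + hi + 1) / 2 ≤ m := by
          by_contra hcon
          exact hinf _ (by omega) hmid2 hfeas
        exact ih _ hi m (by omega) hmm h2 (fun j hj1 hj2 => hfe j (by omega) hj2) hinf
      · rw [if_neg hfeas]
        have hmm : m ≤ (lo + hi + 1) / 2 - 1 := by
          by_contra hcon
          exact hfeas (hfe _ (by omega) (by omega))
        exact ih lo _ m (by omega) h1 hmm hfe (fun j hj1 hj2 => hinf j hj1 (by omega))
    · rw [if_neg hlh]
      omega

theorem pvOuterB_eq_seg (size : Int) (l : List Int)
    (hnn : ∀ x ∈ l, 0 ≤ x) (hle : ∀ x ∈ l, x ≤ size) :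
    ∀ (fuel i g : Nat), i ≤ l.length → l.length - i < fuel →
      pvOuterB (pvPreLoop [0] l 0) size l.length fuel i g = g + pvSeg size (l.drop i) := by
  intro fuel
  induction fuel with
  | zero => intro i g hi hf; omega
  | succ f ih =>
  intro i g hi hf
  rw [pvOuterB]
  by_cases h : i < l.length
  · rw [if_pos h]
    have hdrop : l.drop i = l[i] :: l.drop (i + 1) := List.drop_eq_getElem_cons h
    have hxle : l[i] ≤ size := hle _ (l.getElem_mem h)
    have hch : pvChopN size 0 (l.drop i) = 1 + pvChopN size l[i] (l.drop (i + 1)) := by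
      rw [hdrop, pvChopN, if_pos (by omega : (0 : Int) + l[i] ≤ size), zero_add]
    set c := pvChopN size 0 (l.drop i) with hcdef
    have hc1 : 1 ≤ c := by rw [hch]; omega
    have hc2 : c ≤ l.length - i := by
      have := pvChopN_le_length size 0 (l.drop i)
      simpa using this
    have hsplit : ∀ k : Nat, k ≤ l.length - i → (l.take (i + k)).sum = (l.take i).sum + ((l.drop i).take k).sum := by
      intro k hk
      rw [List.take_add, List.sum_append]
    have hbs : pvBS (pvPreLoop [0] l 0) ((PySem.List.pyGet? (pvPreLoop [0] l 0) (i : Int)).getD 0)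
        size (l.length - (i + 1)) (i + 1) l.length = i + c := by
      rw [pvPre_getP l i (by omega)]
      apply pvBS_exact
      · omega
      · omega
      · omega
      · intro j hj1 hj2
        rw [pvPre_getP l j (by omega)]
        have hmono := takeSum_mono l hnn j (i + c) (by omega)
        have hsum := pvChopN_sum_le size (l.drop i) 0 (by omega)
        rw [← hcdef] at hsum
        have := hsplit c (by omega)
        omega
      · intro j hj1 hj2
        rw [pvPre_getP l j (by omega)]
        have hclt : c < (l.drop i).length := by
          simp only [List.length_drop]
          omega
        have hstop := pvChopN_stop size (l.drop i) 0 hclt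
        rw [← hcdef] at hstop
        have hmono := takeSum_mono l hnn (i + (c + 1)) j (by omega)
        have := hsplit (c + 1) (by omega)
        omega
    rw [hbs]
    rw [ih (i + c) (g + 1) (by omega) (by omega)]
    have hseg : pvSeg size (l.drop i) = 1 + pvSeg size (l.drop (i + c)) := by
      rw [hdrop, pvSeg]
      have hdd : (l.drop (i + 1)).drop (pvChopN size l[i] (l.drop (i + 1)))
          = l.drop (i + c) := by
        rw [List.drop_drop]
        congr 1
        rw [hch]
        omega
      rw [hdd]
    rw [hseg]
    omega
  · rw [if_neg h]
    have hieq : i = l.length := by omega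
    rw [hieq, List.drop_length, pvSeg]
    omega

-- ===== VERDICT (by name: the statement is the Claim_ definition above) =====
theorem make_blueray_spec : Claim_equal_make_blueray := by
  intro total size arr _ hpre
  unfold Spec_make_blueray make_blueray_alt
  by_cases ht : total ≤ 0
  · rw [if_pos ht]
    unfold make_blueray
    rw [pvOuterA, dif_neg (by omega)]
  · rw [if_neg ht]
    push_neg at ht
    rw [A_eq_pvG total size arr ht]
    by_cases hov : arr.any (fun x => size < x)
    · rw [if_pos hov]
      rcases List.any_eq_true.mp hov with ⟨x, hx, hxs⟩
      exact pvG_oversize total size arr.reverse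
        (fun y hy => hpre y (List.mem_reverse.mp hy))
        ⟨x, List.mem_reverse.mpr hx, by simpa using hxs⟩ 0 0 le_rfl
    · rw [if_neg hov]
      have hov' : ∀ x ∈ arr, x ≤ size := by simpa using hov
      have hle : ∀ x ∈ arr.reverse, x ≤ size := fun y hy => hov' y (List.mem_reverse.mp hy)
      have hnn : ∀ x ∈ arr.reverse, 0 ≤ x := fun y hy => hpre y (List.mem_reverse.mp hy)
      rw [pvG_eq_seg total size arr.reverse hle 0 (by omega)]
      have hb := pvOuterB_eq_seg size arr.reverse hnn hle (arr.reverse.length + 1) 0 0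
        (by omega) (by omega)
      simp only [List.drop_zero, Nat.zero_add] at hb
      have hlen : arr.reverse.length = arr.length := by simp
      rw [hlen] at hb
      dsimp only
      rw [hb]
      simp
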